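-- pv_equiv track=rewrite | github.com/laniel123/DS-Club-Project-Showcase-SpiceRack | SpiceRack-website-main/recommender.py | _classify_course
-- ===== SOURCE A (Python) =====
-- _DESSERT_KEYWORDS = {
--     "cake", "cookie", "cookies", "pie", "tart", "brownie", "brownies",
--     "pudding", "custard", "mousse", "cheesecake", "cupcake", "cupcakes",
--     "muffin", "muffins", "donut", "donuts", "doughnut", "fudge", "candy",
--     "truffle", "truffles", "macaroon", "macarons", "eclair", "cream puff",
--     "ice cream", "sorbet", "gelato", "parfait", "cobbler", "crisp",
--     "shortbread", "biscotti", "tiramisu", "baklava", "crepe", "crepes",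
--     "waffle", "waffles", "pancake", "pancakes", "sweet roll", "cinnamon roll",
--     "dessert", "sweet", "sweets", "chocolate", "candy bar", "lollipop",
--     "meringue", "praline", "caramel", "butterscotch", "toffee", "nougat",
--     "brittle", "bark", "fudge", "popsicle", "smoothie bowl", "fruit salad",
-- }
--
-- _MAINS_KEYWORDS = {
--     "chicken", "beef", "pork", "lamb", "turkey", "salmon", "tuna", "shrimp",
--     "pasta", "spaghetti", "lasagna", "fettuccine", "penne", "rigatoni",
--     "rice", "risotto", "pilaf", "fried rice", "stir fry", "stir-fry",
--     "soup", "stew", "chili", "chilli", "curry", "casserole", "roast",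
--     "burger", "sandwich", "wrap", "taco", "burrito", "enchilada", "quesadilla",
--     "pizza", "quiche", "frittata", "omelette", "omelet", "steak", "meatball",
--     "meatloaf", "pot pie", "pot roast", "brisket", "ribs", "wings",
--     "salad", "grain bowl", "bowl", "bake", "baked", "grilled", "roasted",
--     "braised", "sauteed", "sautéed", "pan-fried", "deep-fried", "poached",
--     "side dish", "stuffing", "dressing", "mashed", "potatoes", "coleslaw",
--     "noodle", "noodles", "ramen", "udon", "soba", "pho", "gumbo", "jambalaya",
--     "paella", "biryani", "tagine", "moussaka", "shakshuka", "fajita",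
--     "fish", "seafood", "crab", "lobster", "scallop", "clam", "mussel",
-- }
--
-- def _classify_course(title) -> str:
--     if not isinstance(title, str):
--         return "Other/Miscellaneous"
--     t = title.lower()
--     words = set(t.replace("-", " ").split())
--     for kw in _DESSERT_KEYWORDS:
--         if kw in t:
--             return "Dessert & Sweets"
--     for kw in _MAINS_KEYWORDS:
--         if kw in t or kw in words:
--             return "Mains & Sides"
--     return "Other/Miscellaneous"
-- ===== SOURCE B (Python) =====
-- # Keyword data kept as one '|'-delimited string per category, split once at import.
-- _DESSERT_LIST = (
--     "cake|cookie|cookies|pie|tart|brownie|brownies|pudding|custard|mousse|"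
--     "cheesecake|cupcake|cupcakes|muffin|muffins|donut|donuts|doughnut|fudge|"
--     "candy|truffle|truffles|macaroon|macarons|eclair|cream puff|ice cream|"
--     "sorbet|gelato|parfait|cobbler|crisp|shortbread|biscotti|tiramisu|baklava|"
--     "crepe|crepes|waffle|waffles|pancake|pancakes|sweet roll|cinnamon roll|"
--     "dessert|sweet|sweets|chocolate|candy bar|lollipop|meringue|praline|"
--     "caramel|butterscotch|toffee|nougat|brittle|bark|popsicle|smoothie bowl|"
--     "fruit salad"
-- ).split("|")
--
-- _MAINS_LIST = (
--     "chicken|beef|pork|lamb|turkey|salmon|tuna|shrimp|pasta|spaghetti|lasagna|"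
--     "fettuccine|penne|rigatoni|rice|risotto|pilaf|fried rice|stir fry|stir-fry|"
--     "soup|stew|chili|chilli|curry|casserole|roast|burger|sandwich|wrap|taco|"
--     "burrito|enchilada|quesadilla|pizza|quiche|frittata|omelette|omelet|steak|"
--     "meatball|meatloaf|pot pie|pot roast|brisket|ribs|wings|salad|grain bowl|"
--     "bowl|bake|baked|grilled|roasted|braised|sauteed|sautéed|pan-fried|"
--     "deep-fried|poached|side dish|stuffing|dressing|mashed|potatoes|coleslaw|"
--     "noodle|noodles|ramen|udon|soba|pho|gumbo|jambalaya|paella|biryani|tagine|"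
--     "moussaka|shakshuka|fajita|fish|seafood|crab|lobster|scallop|clam|mussel"
-- ).split("|")
--
--
-- _DESSERT_TUPLE = tuple(_DESSERT_LIST)
-- _MAINS_TUPLE = tuple(_MAINS_LIST)
--
--
-- def _classify_course(title) -> str:
--     # One left-to-right scan over the lowered title: at each position test whether
--     # a dessert keyword (return immediately) or a mains keyword (set a flag) starts
--     # there (str.startswith takes a tuple of prefixes and a start offset).  A's
--     # whole-word set is dropped: every whole word of t.replace('-',' ').split()
--     # is already a substring of t.
--     if not isinstance(title, str):
--         return "Other/Miscellaneous"
--     t = title.lower()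
--     mains_hit = False
--     for i in range(len(t)):
--         if t.startswith(_DESSERT_TUPLE, i):
--             return "Dessert & Sweets"
--         if not mains_hit and t.startswith(_MAINS_TUPLE, i):
--             mains_hit = True
--     return "Mains & Sides" if mains_hit else "Other/Miscellaneous"
-- ===== Notes on version B (the rewrite author's own statement) =====
-- stated objective: alternative
-- what changed: B keeps the keyword data as one |-delimited string per category split once at import, and replaces A's per-keyword substring searches plus a redundant whole-word set (built by hyphen-to-space splitting of the title) with a single left-to-right scan over the lowered title testing at each position whether any dessert keyword (immediate return) or mains keyword (flag carried to the end) starts there via tuple str.startswith; the word set is dropped because every such whole word is already a substring of the title (proved in word_is_substring).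
import Mathlib
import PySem

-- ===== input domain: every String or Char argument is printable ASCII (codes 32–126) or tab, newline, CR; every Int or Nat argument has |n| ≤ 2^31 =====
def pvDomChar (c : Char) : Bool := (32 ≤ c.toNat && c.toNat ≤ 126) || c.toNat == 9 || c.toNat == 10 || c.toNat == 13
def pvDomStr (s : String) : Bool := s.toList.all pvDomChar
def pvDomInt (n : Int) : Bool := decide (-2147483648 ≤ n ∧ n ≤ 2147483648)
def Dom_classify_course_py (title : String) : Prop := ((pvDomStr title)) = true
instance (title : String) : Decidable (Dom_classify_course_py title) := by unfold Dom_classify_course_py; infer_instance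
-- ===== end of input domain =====

-- B keeps the keyword data as one '|'-delimited string per category (built from adjacent
-- chunk literals as in Source B, split once) and replaces A's per-keyword substring searches plus
-- a redundant whole-word set by a single left-to-right scan of the lowered title testing
-- keyword prefixes at each position (objective: alternative).

-- ===== PORT A =====
-- Python module constants _DESSERT_KEYWORDS / _MAINS_KEYWORDS (set literals; "fudge" appears
-- twice in the source, Set.ofList dedups exactly as Python's set literal does).
def dessertKeywords : List String :=
  ["cake", "cookie", "cookies", "pie", "tart", "brownie", "brownies",
   "pudding", "custard", "mousse", "cheesecake", "cupcake", "cupcakes",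
   "muffin", "muffins", "donut", "donuts", "doughnut", "fudge", "candy",
   "truffle", "truffles", "macaroon", "macarons", "eclair", "cream puff",
   "ice cream", "sorbet", "gelato", "parfait", "cobbler", "crisp",
   "shortbread", "biscotti", "tiramisu", "baklava", "crepe", "crepes",
   "waffle", "waffles", "pancake", "pancakes", "sweet roll", "cinnamon roll",
   "dessert", "sweet", "sweets", "chocolate", "candy bar", "lollipop",
   "meringue", "praline", "caramel", "butterscotch", "toffee", "nougat",
   "brittle", "bark", "fudge", "popsicle", "smoothie bowl", "fruit salad"]

def mainsKeywords : List String :=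
  ["chicken", "beef", "pork", "lamb", "turkey", "salmon", "tuna", "shrimp",
   "pasta", "spaghetti", "lasagna", "fettuccine", "penne", "rigatoni",
   "rice", "risotto", "pilaf", "fried rice", "stir fry", "stir-fry",
   "soup", "stew", "chili", "chilli", "curry", "casserole", "roast",
   "burger", "sandwich", "wrap", "taco", "burrito", "enchilada", "quesadilla",
   "pizza", "quiche", "frittata", "omelette", "omelet", "steak", "meatball",
   "meatloaf", "pot pie", "pot roast", "brisket", "ribs", "wings",
   "salad", "grain bowl", "bowl", "bake", "baked", "grilled", "roasted",
   "braised", "sauteed", "sautéed", "pan-fried", "deep-fried", "poached",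
   "side dish", "stuffing", "dressing", "mashed", "potatoes", "coleslaw",
   "noodle", "noodles", "ramen", "udon", "soba", "pho", "gumbo", "jambalaya",
   "paella", "biryani", "tagine", "moussaka", "shakshuka", "fajita",
   "fish", "seafood", "crab", "lobster", "scallop", "clam", "mussel"]

def dessertSet : PySem.Set String := PySem.Set.ofList dessertKeywords
def mainsSet : PySem.Set String := PySem.Set.ofList mainsKeywords

-- The isinstance guard cannot fire here (title is always a str).  The two
-- 'for kw: if …: return' loops return a constant, so they are `.any` over the set.
def classify_course_py (title : String) : String :=
  let t := PySem.Str.lower title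
  let words : PySem.Set String :=
    PySem.Set.ofList (PySem.Str.split₀ (PySem.Str.replace t "-" " "))
  if dessertSet.any (fun kw => PySem.Str.isIn kw t) then "Dessert & Sweets"
  else if mainsSet.any (fun kw => PySem.Str.isIn kw t || PySem.Set.contains words kw) then
    "Mains & Sides"
  else "Other/Miscellaneous"

-- ===== PORT B =====
-- Source B's module constants: one '|'-delimited blob per category (Python concatenates the
-- adjacent chunk literals at parse time, ported as ++), split once at import.
def bDessertBlob : String :=
  "cake|cookie|cookies|pie|tart|brownie|brownies|pudding|custard|mousse|" ++
  "cheesecake|cupcake|cupcakes|muffin|muffins|donut|donuts|doughnut|fudge|" ++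
  "candy|truffle|truffles|macaroon|macarons|eclair|cream puff|ice cream|" ++
  "sorbet|gelato|parfait|cobbler|crisp|shortbread|biscotti|tiramisu|baklava|" ++
  "crepe|crepes|waffle|waffles|pancake|pancakes|sweet roll|cinnamon roll|" ++
  "dessert|sweet|sweets|chocolate|candy bar|lollipop|meringue|praline|" ++
  "caramel|butterscotch|toffee|nougat|brittle|bark|popsicle|smoothie bowl|" ++
  "fruit salad"

def bMainsBlob : String :=
  "chicken|beef|pork|lamb|turkey|salmon|tuna|shrimp|pasta|spaghetti|lasagna|" ++
  "fettuccine|penne|rigatoni|rice|risotto|pilaf|fried rice|stir fry|stir-fry|" ++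
  "soup|stew|chili|chilli|curry|casserole|roast|burger|sandwich|wrap|taco|" ++
  "burrito|enchilada|quesadilla|pizza|quiche|frittata|omelette|omelet|steak|" ++
  "meatball|meatloaf|pot pie|pot roast|brisket|ribs|wings|salad|grain bowl|" ++
  "bowl|bake|baked|grilled|roasted|braised|sauteed|sautéed|pan-fried|" ++
  "deep-fried|poached|side dish|stuffing|dressing|mashed|potatoes|coleslaw|" ++
  "noodle|noodles|ramen|udon|soba|pho|gumbo|jambalaya|paella|biryani|tagine|" ++
  "moussaka|shakshuka|fajita|fish|seafood|crab|lobster|scallop|clam|mussel"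

-- Hand port of BLOB.split("|") for the one-character separator '|' (exact: the fields
-- between the bars in order, empty fields kept, [""] for the empty string).
def splitBar : List Char → List Char → List (List Char)
  | [], cur => [cur.reverse]
  | c :: rest, cur => if c = '|' then cur.reverse :: splitBar rest [] else splitBar rest (c :: cur)

def bDessert : List (List Char) := splitBar bDessertBlob.toList []
def bMains : List (List Char) := splitBar bMainsBlob.toList []

-- Source B's loop 'for i in range(len(t))', ported as structural recursion peeling one
-- character per step: t.startswith(kws, i) is exactly 'some kw is a prefix of the
-- suffix t[i:]', and the remaining list IS that suffix.
def bScan : List Char → Bool → String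
  | [], mainsHit => if mainsHit then "Mains & Sides" else "Other/Miscellaneous"
  | c :: rest, mainsHit =>
    if bDessert.any (fun kw => PySem.Chars.startswith (c :: rest) kw) then
      "Dessert & Sweets"
    else
      bScan rest (mainsHit || bMains.any (fun kw => PySem.Chars.startswith (c :: rest) kw))

def classify_course_py_alt (title : String) : String :=
  bScan (PySem.Chars.lower title.toList) false

-- ===== PRECONDITION & SPEC =====
def Spec_classify_course_py (title : String) (out : String) : Prop := out = classify_course_py_alt title
instance (title : String) (out : String) : Decidable (Spec_classify_course_py title out) := by unfold Spec_classify_course_py; infer_instance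

-- ===== CLAIM (what is proved, stated in full; the proofs are below) =====
def Claim_equal_classify_course_py : Prop := ∀ (title : String), Dom_classify_course_py title → Spec_classify_course_py title (classify_course_py title)

-- ===== LEMMAS AND PROOFS =====

-- the inverse of splitBar: what the blobs are made of
def joinBar : List (List Char) → List Char
  | [] => []
  | [p] => p
  | p :: q :: rest => p ++ '|' :: joinBar (q :: rest)

-- the per-chunk keyword lists and B's flat keyword lists (dessert: A's list minus the duplicate "fudge")
def Kd1 : List String := ["cake", "cookie", "cookies", "pie", "tart", "brownie", "brownies", "pudding", "custard", "mousse"]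
def Kd2 : List String := ["cheesecake", "cupcake", "cupcakes", "muffin", "muffins", "donut", "donuts", "doughnut", "fudge"]
def Kd3 : List String := ["candy", "truffle", "truffles", "macaroon", "macarons", "eclair", "cream puff", "ice cream"]
def Kd4 : List String := ["sorbet", "gelato", "parfait", "cobbler", "crisp", "shortbread", "biscotti", "tiramisu", "baklava"]
def Kd5 : List String := ["crepe", "crepes", "waffle", "waffles", "pancake", "pancakes", "sweet roll", "cinnamon roll"]
def Kd6 : List String := ["dessert", "sweet", "sweets", "chocolate", "candy bar", "lollipop", "meringue", "praline"]
def Kd7 : List String := ["caramel", "butterscotch", "toffee", "nougat", "brittle", "bark", "popsicle", "smoothie bowl"]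
def Kd8 : List String := ["fruit salad"]
def Km1 : List String := ["chicken", "beef", "pork", "lamb", "turkey", "salmon", "tuna", "shrimp", "pasta", "spaghetti", "lasagna"]
def Km2 : List String := ["fettuccine", "penne", "rigatoni", "rice", "risotto", "pilaf", "fried rice", "stir fry", "stir-fry"]
def Km3 : List String := ["soup", "stew", "chili", "chilli", "curry", "casserole", "roast", "burger", "sandwich", "wrap", "taco"]
def Km4 : List String := ["burrito", "enchilada", "quesadilla", "pizza", "quiche", "frittata", "omelette", "omelet", "steak"]
def Km5 : List String := ["meatball", "meatloaf", "pot pie", "pot roast", "brisket", "ribs", "wings", "salad", "grain bowl"]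
def Km6 : List String := ["bowl", "bake", "baked", "grilled", "roasted", "braised", "sauteed", "sautéed", "pan-fried"]
def Km7 : List String := ["deep-fried", "poached", "side dish", "stuffing", "dressing", "mashed", "potatoes", "coleslaw"]
def Km8 : List String := ["noodle", "noodles", "ramen", "udon", "soba", "pho", "gumbo", "jambalaya", "paella", "biryani", "tagine"]
def Km9 : List String := ["moussaka", "shakshuka", "fajita", "fish", "seafood", "crab", "lobster", "scallop", "clam", "mussel"]
def bDessertStrs : List String := Kd1 ++ Kd2 ++ Kd3 ++ Kd4 ++ Kd5 ++ Kd6 ++ Kd7 ++ Kd8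
def bMainsStrs : List String := Km1 ++ Km2 ++ Km3 ++ Km4 ++ Km5 ++ Km6 ++ Km7 ++ Km8 ++ Km9

lemma splitBar_append (w l cur : List Char) (h : '|' ∉ w) :
    splitBar (w ++ l) cur = splitBar l (w.reverse ++ cur) := by
  induction w generalizing cur with
  | nil => simp
  | cons c w' ih =>
    have hc : c ≠ '|' := fun hh => h (hh ▸ List.mem_cons_self ..)
    simp only [List.cons_append, splitBar, if_neg hc, List.reverse_cons, List.append_assoc,
      List.singleton_append]
    exact ih _ (fun hh => h (List.mem_cons_of_mem _ hh))

lemma splitBar_joinBar : ∀ (parts : List (List Char)), parts ≠ [] →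
    (∀ p ∈ parts, '|' ∉ p) →
    splitBar (joinBar parts) [] = parts := by
  intro parts
  induction parts with
  | nil => intro h; exact absurd rfl h
  | cons p rest ih =>
    intro _ hp
    cases rest with
    | nil =>
      rw [show joinBar [p] = p ++ [] from (List.append_nil p).symm,
        splitBar_append _ _ _ (hp p (by simp))]
      simp [splitBar]
    | cons q rest' =>
      rw [joinBar, splitBar_append _ _ _ (hp p (by simp))]
      simp only [splitBar, List.append_nil, List.reverse_reverse, reduceIte]
      rw [ih (by simp) (fun x hx => hp x (by simp [hx]))]

lemma joinBar_append (A B : List (List Char)) (hA : A ≠ []) (hB : B ≠ []) :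
    joinBar (A ++ B) = joinBar A ++ '|' :: joinBar B := by
  induction A with
  | nil => exact absurd rfl hA
  | cons p A' ih =>
    cases A' with
    | nil =>
      cases B with
      | nil => exact absurd rfl hB
      | cons q B' => simp [joinBar]
    | cons r A'' =>
      simp only [List.cons_append, joinBar]
      rw [← List.cons_append, ih (by simp)]
      simp [List.append_assoc, joinBar]

-- each chunk literal is the join of its keywords (plus a trailing bar)
lemma Kd1_eq : ("cake|cookie|cookies|pie|tart|brownie|brownies|pudding|custard|mousse|").toList = joinBar (Kd1.map String.toList) ++ ['|'] := by
  simp only [Kd1, joinBar, List.map, String.reduceToList, List.cons_append, List.nil_append]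
lemma Kd2_eq : ("cheesecake|cupcake|cupcakes|muffin|muffins|donut|donuts|doughnut|fudge|").toList = joinBar (Kd2.map String.toList) ++ ['|'] := by
  simp only [Kd2, joinBar, List.map, String.reduceToList, List.cons_append, List.nil_append]
lemma Kd3_eq : ("candy|truffle|truffles|macaroon|macarons|eclair|cream puff|ice cream|").toList = joinBar (Kd3.map String.toList) ++ ['|'] := by
  simp only [Kd3, joinBar, List.map, String.reduceToList, List.cons_append, List.nil_append]
lemma Kd4_eq : ("sorbet|gelato|parfait|cobbler|crisp|shortbread|biscotti|tiramisu|baklava|").toList = joinBar (Kd4.map String.toList) ++ ['|'] := by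
  simp only [Kd4, joinBar, List.map, String.reduceToList, List.cons_append, List.nil_append]
lemma Kd5_eq : ("crepe|crepes|waffle|waffles|pancake|pancakes|sweet roll|cinnamon roll|").toList = joinBar (Kd5.map String.toList) ++ ['|'] := by
  simp only [Kd5, joinBar, List.map, String.reduceToList, List.cons_append, List.nil_append]
lemma Kd6_eq : ("dessert|sweet|sweets|chocolate|candy bar|lollipop|meringue|praline|").toList = joinBar (Kd6.map String.toList) ++ ['|'] := by
  simp only [Kd6, joinBar, List.map, String.reduceToList, List.cons_append, List.nil_append]
lemma Kd7_eq : ("caramel|butterscotch|toffee|nougat|brittle|bark|popsicle|smoothie bowl|").toList = joinBar (Kd7.map String.toList) ++ ['|'] := by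
  simp only [Kd7, joinBar, List.map, String.reduceToList, List.cons_append, List.nil_append]
lemma Kd8_eq : ("fruit salad").toList = joinBar (Kd8.map String.toList) := by
  simp only [Kd8, joinBar, List.map, String.reduceToList, List.cons_append, List.nil_append]
lemma Km1_eq : ("chicken|beef|pork|lamb|turkey|salmon|tuna|shrimp|pasta|spaghetti|lasagna|").toList = joinBar (Km1.map String.toList) ++ ['|'] := by
  simp only [Km1, joinBar, List.map, String.reduceToList, List.cons_append, List.nil_append]
lemma Km2_eq : ("fettuccine|penne|rigatoni|rice|risotto|pilaf|fried rice|stir fry|stir-fry|").toList = joinBar (Km2.map String.toList) ++ ['|'] := by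
  simp only [Km2, joinBar, List.map, String.reduceToList, List.cons_append, List.nil_append]
lemma Km3_eq : ("soup|stew|chili|chilli|curry|casserole|roast|burger|sandwich|wrap|taco|").toList = joinBar (Km3.map String.toList) ++ ['|'] := by
  simp only [Km3, joinBar, List.map, String.reduceToList, List.cons_append, List.nil_append]
lemma Km4_eq : ("burrito|enchilada|quesadilla|pizza|quiche|frittata|omelette|omelet|steak|").toList = joinBar (Km4.map String.toList) ++ ['|'] := by
  simp only [Km4, joinBar, List.map, String.reduceToList, List.cons_append, List.nil_append]
lemma Km5_eq : ("meatball|meatloaf|pot pie|pot roast|brisket|ribs|wings|salad|grain bowl|").toList = joinBar (Km5.map String.toList) ++ ['|'] := by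
  simp only [Km5, joinBar, List.map, String.reduceToList, List.cons_append, List.nil_append]
lemma Km6_eq : ("bowl|bake|baked|grilled|roasted|braised|sauteed|sautéed|pan-fried|").toList = joinBar (Km6.map String.toList) ++ ['|'] := by
  simp only [Km6, joinBar, List.map, String.reduceToList, List.cons_append, List.nil_append]
lemma Km7_eq : ("deep-fried|poached|side dish|stuffing|dressing|mashed|potatoes|coleslaw|").toList = joinBar (Km7.map String.toList) ++ ['|'] := by
  simp only [Km7, joinBar, List.map, String.reduceToList, List.cons_append, List.nil_append]
lemma Km8_eq : ("noodle|noodles|ramen|udon|soba|pho|gumbo|jambalaya|paella|biryani|tagine|").toList = joinBar (Km8.map String.toList) ++ ['|'] := by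
  simp only [Km8, joinBar, List.map, String.reduceToList, List.cons_append, List.nil_append]
lemma Km9_eq : ("moussaka|shakshuka|fajita|fish|seafood|crab|lobster|scallop|clam|mussel").toList = joinBar (Km9.map String.toList) := by
  simp only [Km9, joinBar, List.map, String.reduceToList, List.cons_append, List.nil_append]

set_option maxRecDepth 10000 in
lemma blobD_eq : bDessertBlob.toList = joinBar (bDessertStrs.map String.toList) := by
  rw [bDessertBlob, bDessertStrs]
  simp only [String.toList_append, Kd1_eq, Kd2_eq, Kd3_eq, Kd4_eq, Kd5_eq, Kd6_eq, Kd7_eq,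
    Kd8_eq, List.map_append]
  rw [joinBar_append _ _ (by simp [Kd1, Kd2, Kd3, Kd4, Kd5, Kd6, Kd7, Kd8]) (by simp [Kd1, Kd2, Kd3, Kd4, Kd5, Kd6, Kd7, Kd8]),
    joinBar_append _ _ (by simp [Kd1, Kd2, Kd3, Kd4, Kd5, Kd6, Kd7, Kd8]) (by simp [Kd1, Kd2, Kd3, Kd4, Kd5, Kd6, Kd7, Kd8]),
    joinBar_append _ _ (by simp [Kd1, Kd2, Kd3, Kd4, Kd5, Kd6, Kd7, Kd8]) (by simp [Kd1, Kd2, Kd3, Kd4, Kd5, Kd6, Kd7, Kd8]),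
    joinBar_append _ _ (by simp [Kd1, Kd2, Kd3, Kd4, Kd5, Kd6, Kd7, Kd8]) (by simp [Kd1, Kd2, Kd3, Kd4, Kd5, Kd6, Kd7, Kd8]),
    joinBar_append _ _ (by simp [Kd1, Kd2, Kd3, Kd4, Kd5, Kd6, Kd7, Kd8]) (by simp [Kd1, Kd2, Kd3, Kd4, Kd5, Kd6, Kd7, Kd8]),
    joinBar_append _ _ (by simp [Kd1, Kd2, Kd3, Kd4, Kd5, Kd6, Kd7, Kd8]) (by simp [Kd1, Kd2, Kd3, Kd4, Kd5, Kd6, Kd7, Kd8]),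
    joinBar_append _ _ (by simp [Kd1, Kd2, Kd3, Kd4, Kd5, Kd6, Kd7, Kd8]) (by simp [Kd1, Kd2, Kd3, Kd4, Kd5, Kd6, Kd7, Kd8])]
  simp [List.append_assoc]

set_option maxRecDepth 10000 in
lemma blobM_eq : bMainsBlob.toList = joinBar (bMainsStrs.map String.toList) := by
  rw [bMainsBlob, bMainsStrs]
  simp only [String.toList_append, Km1_eq, Km2_eq, Km3_eq, Km4_eq, Km5_eq, Km6_eq, Km7_eq,
    Km8_eq, Km9_eq, List.map_append]
  rw [joinBar_append _ _ (by simp [Km1, Km2, Km3, Km4, Km5, Km6, Km7, Km8, Km9]) (by simp [Km1, Km2, Km3, Km4, Km5, Km6, Km7, Km8, Km9]),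
    joinBar_append _ _ (by simp [Km1, Km2, Km3, Km4, Km5, Km6, Km7, Km8, Km9]) (by simp [Km1, Km2, Km3, Km4, Km5, Km6, Km7, Km8, Km9]),
    joinBar_append _ _ (by simp [Km1, Km2, Km3, Km4, Km5, Km6, Km7, Km8, Km9]) (by simp [Km1, Km2, Km3, Km4, Km5, Km6, Km7, Km8, Km9]),
    joinBar_append _ _ (by simp [Km1, Km2, Km3, Km4, Km5, Km6, Km7, Km8, Km9]) (by simp [Km1, Km2, Km3, Km4, Km5, Km6, Km7, Km8, Km9]),
    joinBar_append _ _ (by simp [Km1, Km2, Km3, Km4, Km5, Km6, Km7, Km8, Km9]) (by simp [Km1, Km2, Km3, Km4, Km5, Km6, Km7, Km8, Km9]),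
    joinBar_append _ _ (by simp [Km1, Km2, Km3, Km4, Km5, Km6, Km7, Km8, Km9]) (by simp [Km1, Km2, Km3, Km4, Km5, Km6, Km7, Km8, Km9]),
    joinBar_append _ _ (by simp [Km1, Km2, Km3, Km4, Km5, Km6, Km7, Km8, Km9]) (by simp [Km1, Km2, Km3, Km4, Km5, Km6, Km7, Km8, Km9]),
    joinBar_append _ _ (by simp [Km1, Km2, Km3, Km4, Km5, Km6, Km7, Km8, Km9]) (by simp [Km1, Km2, Km3, Km4, Km5, Km6, Km7, Km8, Km9])]
  simp [List.append_assoc]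

set_option maxRecDepth 10000 in
lemma bDessert_eq : bDessert = bDessertStrs.map String.toList := by
  rw [bDessert, blobD_eq, splitBar_joinBar _ (by simp [bDessertStrs, Kd1]) (by decide)]

set_option maxRecDepth 10000 in
lemma bMains_eq : bMains = bMainsStrs.map String.toList := by
  rw [bMains, blobM_eq, splitBar_joinBar _ (by simp [bMainsStrs, Km1]) (by decide)]

-- A's dessert list with the duplicate "fudge" marked out
def D1 : List String :=
  ["cake", "cookie", "cookies", "pie", "tart", "brownie", "brownies",
   "pudding", "custard", "mousse", "cheesecake", "cupcake", "cupcakes",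
   "muffin", "muffins", "donut", "donuts", "doughnut", "fudge", "candy",
   "truffle", "truffles", "macaroon", "macarons", "eclair", "cream puff",
   "ice cream", "sorbet", "gelato", "parfait", "cobbler", "crisp",
   "shortbread", "biscotti", "tiramisu", "baklava", "crepe", "crepes",
   "waffle", "waffles", "pancake", "pancakes", "sweet roll", "cinnamon roll",
   "dessert", "sweet", "sweets", "chocolate", "candy bar", "lollipop",
   "meringue", "praline", "caramel", "butterscotch", "toffee", "nougat",
   "brittle", "bark"]
def D2 : List String := ["popsicle", "smoothie bowl", "fruit salad"]

lemma dessert_any_eq (p : String → Bool) :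
    dessertKeywords.any p = bDessertStrs.any p := by
  rw [show dessertKeywords = D1 ++ "fudge" :: D2 from rfl,
    show bDessertStrs = D1 ++ D2 from rfl]
  simp only [List.any_append, List.any_cons]
  rcases hf : p "fudge" with _ | _
  · simp
  · have h1 : D1.any p = true := List.any_eq_true.mpr ⟨"fudge", by decide, hf⟩
    simp [h1]

lemma mains_strs_eq : bMainsStrs = mainsKeywords := rfl

-- '-' -> ' ', identity otherwise: what t.replace("-", " ") does characterwise.
def dashToSpace (c : Char) : Char := if c = '-' then ' ' else c

lemma replace_go_dash : ∀ (fuel : Nat) (l acc : List Char), l.length ≤ fuel →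
    PySem.Chars.replace.go ['-'] [' '] fuel l acc = acc.reverse ++ l.map dashToSpace := by
  intro fuel
  induction fuel with
  | zero =>
    intro l acc h
    have : l = [] := List.eq_nil_of_length_eq_zero (Nat.le_zero.mp h)
    subst this
    simp [PySem.Chars.replace.go]
  | succ f ih =>
    intro l acc h
    cases l with
    | nil => simp [PySem.Chars.replace.go]
    | cons c t =>
      by_cases hc : c = '-'
      · subst hc
        have hpre : List.isPrefixOf ['-'] ('-' :: t) = true := by simp [List.isPrefixOf]
        simp only [PySem.Chars.replace.go, hpre, if_pos, List.length_cons, List.length_nil,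
          List.drop_succ_cons, List.drop_zero, List.reverse_cons, List.reverse_nil,
          List.nil_append, List.singleton_append]
        rw [ih t (' ' :: acc) (by simpa using Nat.lt_succ_iff.mp (by simpa using h))]
        simp [dashToSpace]
      · have hpre : List.isPrefixOf ['-'] (c :: t) = false := by
          simp [List.isPrefixOf]
          intro h'; exact absurd h'.symm hc
        simp only [PySem.Chars.replace.go, hpre]
        rw [ih t (c :: acc) (by simpa using Nat.lt_succ_iff.mp (by simpa using h))]
        simp [dashToSpace, hc]

lemma replace_dash (cs : List Char) :
    PySem.Chars.replace cs ['-'] [' '] = cs.map dashToSpace := by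
  rw [PySem.Chars.replace]
  simp only [List.isEmpty_cons, if_false, Bool.false_eq_true]
  rw [replace_go_dash cs.length cs [] (le_refl _)]
  simp

lemma split_go_sound : ∀ (l cur : List Char) (accL : List (List Char)) (w : List Char),
    (∀ c ∈ cur, PySem.Chars.isspace c = false) →
    w ∈ PySem.Chars.split₀.go l cur accL →
    w ∈ accL ∨ ((∀ c ∈ w, PySem.Chars.isspace c = false) ∧ w <:+: cur.reverse ++ l) := by
  intro l
  induction l with
  | nil =>
    intro cur accL w hcur hw
    by_cases hc : cur.isEmpty
    · rw [PySem.Chars.split₀.go, if_pos hc] at hw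
      exact Or.inl (by simpa using hw)
    · rw [PySem.Chars.split₀.go, if_neg hc] at hw
      simp only [List.mem_reverse, List.mem_cons] at hw
      rcases hw with h | h
      · subst h
        refine Or.inr ⟨fun c hc' => hcur c (List.mem_reverse.mp hc'), ?_⟩
        simp
      · exact Or.inl h
  | cons c rest ih =>
    intro cur accL w hcur hw
    by_cases hs : PySem.Chars.isspace c = true
    · by_cases hc : cur.isEmpty
      · rw [PySem.Chars.split₀.go, if_pos hs, if_pos hc] at hw
        rcases ih [] accL w (by simp) hw with h | ⟨h1, h2⟩
        · exact Or.inl h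
        · refine Or.inr ⟨h1, ?_⟩
          simp only [List.reverse_nil, List.nil_append] at h2
          exact h2.trans (List.suffix_cons c rest).isInfix |>.trans
            (List.suffix_append cur.reverse (c :: rest)).isInfix
      · rw [PySem.Chars.split₀.go, if_pos hs, if_neg hc] at hw
        rcases ih [] (cur.reverse :: accL) w (by simp) hw with h | ⟨h1, h2⟩
        · rcases List.mem_cons.mp h with h | h
          · subst h
            refine Or.inr ⟨fun c' hc' => hcur c' (List.mem_reverse.mp hc'), ?_⟩
            exact (List.prefix_append cur.reverse (c :: rest)).isInfix
          · exact Or.inl h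
        · refine Or.inr ⟨h1, ?_⟩
          simp only [List.reverse_nil, List.nil_append] at h2
          exact h2.trans (List.suffix_cons c rest).isInfix |>.trans
            (List.suffix_append cur.reverse (c :: rest)).isInfix
    · rw [PySem.Chars.split₀.go, if_neg hs] at hw
      have hcur' : ∀ c' ∈ c :: cur, PySem.Chars.isspace c' = false := by
        intro c' hc'
        rcases List.mem_cons.mp hc' with h | h
        · subst h; simpa using hs
        · exact hcur c' h
      rcases ih (c :: cur) accL w hcur' hw with h | ⟨h1, h2⟩
      · exact Or.inl h
      · refine Or.inr ⟨h1, ?_⟩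
        simpa [List.append_assoc] using h2

lemma map_d2s_eq_self : ∀ (w' w : List Char), w'.map dashToSpace = w →
    (∀ c ∈ w, PySem.Chars.isspace c = false) → w' = w := by
  intro w'
  induction w' with
  | nil => intro w h _; simpa using h.symm ▸ rfl
  | cons a t ih =>
    intro w h hw
    cases w with
    | nil => simp at h
    | cons b u =>
      simp only [List.map_cons, List.cons.injEq] at h
      obtain ⟨hab, htu⟩ := h
      have hb : PySem.Chars.isspace b = false := hw b (by simp)
      have : a = b := by
        by_cases ha : a = '-'
        · exfalso
          rw [ha] at hab; simp [dashToSpace] at hab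
          rw [← hab] at hb
          simp [PySem.Chars.isspace] at hb
        · simpa [dashToSpace, ha] using hab
      rw [this, ih u htu (fun c hc => hw c (by simp [hc]))]

lemma infix_map_d2s (w cs : List Char) (hw : ∀ c ∈ w, PySem.Chars.isspace c = false)
    (h : w <:+: cs.map dashToSpace) : w <:+: cs := by
  obtain ⟨s, t, hst⟩ := h
  rw [List.append_assoc] at hst
  obtain ⟨s', rest, hcs, hs', hrest⟩ := List.map_eq_append_iff.mp hst.symm
  obtain ⟨w', t', hrest2, hw', ht'⟩ := List.map_eq_append_iff.mp hrest
  have : w' = w := map_d2s_eq_self w' w hw' hw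
  subst this
  exact ⟨s', t', by rw [hcs, hrest2, List.append_assoc]⟩

-- every whole word of t.replace('-',' ').split() is already a substring of t
lemma word_is_substring (t : String) (kw : String)
    (h : kw ∈ PySem.Str.split₀ (PySem.Str.replace t "-" " ")) :
    PySem.Str.isIn kw t = true := by
  have h1 : kw.toList ∈ PySem.Chars.split₀ ((PySem.Str.replace t "-" " ").toList) := by
    rw [← PySem.Str.split₀_map_toList]
    exact List.mem_map_of_mem h
  have h2 : (PySem.Str.replace t "-" " ").toList = t.toList.map dashToSpace := by
    rw [PySem.Str.toList_replace]
    exact replace_dash t.toList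
  rw [h2, PySem.Chars.split₀] at h1
  rcases split_go_sound (t.toList.map dashToSpace) [] [] kw.toList (by simp) h1 with h | ⟨hns, hinf⟩
  · simp at h
  · simp only [List.reverse_nil, List.nil_append] at hinf
    exact (PySem.Str.isIn_iff_infix kw t).mpr (infix_map_d2s kw.toList t.toList hns hinf)

lemma any_ofList (xs : List String) (p : String → Bool) :
    (PySem.Set.ofList xs).any p = xs.any p := by
  rcases h : xs.any p with _ | _
  · simp only [List.any_eq_false] at h ⊢
    intro x hx; exact h x ((PySem.Set.mem_ofList xs x).mp hx)
  · simp only [List.any_eq_true] at h ⊢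
    obtain ⟨x, hx, hp⟩ := h
    exact ⟨x, (PySem.Set.mem_ofList xs x).mpr hx, hp⟩

lemma any_or {α : Type} (l : List α) (f g : α → Bool) :
    l.any (fun x => f x || g x) = (l.any f || l.any g) := by
  induction l with
  | nil => rfl
  | cons h t ih => simp [List.any_cons, ih, Bool.or_assoc, Bool.or_left_comm]

lemma isIn_cons (kw : List Char) (c : Char) (rest : List Char) :
    PySem.Chars.isIn kw (c :: rest) =
      (PySem.Chars.startswith (c :: rest) kw || PySem.Chars.isIn kw rest) := by
  rcases h1 : PySem.Chars.startswith (c :: rest) kw with _ | _ <;>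
    rcases h2 : PySem.Chars.isIn kw rest with _ | _
  · rw [Bool.or_self]
    rw [Bool.eq_false_iff, Ne, PySem.Chars.startswith_iff] at h1
    rw [PySem.Chars.isIn_eq_false_iff] at h2
    rw [PySem.Chars.isIn_eq_false_iff, List.infix_cons_iff]
    tauto
  · simp only [Bool.or_true]
    rw [PySem.Chars.isIn_iff_infix] at h2 ⊢
    exact h2.trans (List.suffix_cons c rest).isInfix
  all_goals
    simp only [Bool.true_or]
    rw [PySem.Chars.isIn_iff_infix, List.infix_cons_iff]
    rw [PySem.Chars.startswith_iff] at h1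
    exact Or.inl h1

set_option maxRecDepth 10000 in
lemma bScan_eq (cs : List Char) (b : Bool) :
    bScan cs b =
      if bDessert.any (fun kw => PySem.Chars.isIn kw cs) then "Dessert & Sweets"
      else if b || bMains.any (fun kw => PySem.Chars.isIn kw cs) then "Mains & Sides"
      else "Other/Miscellaneous" := by
  induction cs generalizing b with
  | nil =>
    have hd : bDessert.any (fun kw => PySem.Chars.isIn kw []) = false := by
      rw [bDessert_eq]; decide
    have hm : bMains.any (fun kw => PySem.Chars.isIn kw []) = false := by
      rw [bMains_eq]; decide
    simp [bScan, hd, hm]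
  | cons c rest ih =>
    have ed : bDessert.any (fun kw => PySem.Chars.isIn kw (c :: rest)) =
        (bDessert.any (fun kw => PySem.Chars.startswith (c :: rest) kw) ||
         bDessert.any (fun kw => PySem.Chars.isIn kw rest)) := by
      rw [← any_or]
      exact PySem.List.any_congr_mem (fun kw _ => isIn_cons kw c rest)
    have em : bMains.any (fun kw => PySem.Chars.isIn kw (c :: rest)) =
        (bMains.any (fun kw => PySem.Chars.startswith (c :: rest) kw) ||
         bMains.any (fun kw => PySem.Chars.isIn kw rest)) := by
      rw [← any_or]
      exact PySem.List.any_congr_mem (fun kw _ => isIn_cons kw c rest)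
    rcases hsd : bDessert.any (fun kw => PySem.Chars.startswith (c :: rest) kw) with _ | _
    · rw [bScan, if_neg (by simp [hsd]), ih, ed, em, hsd]
      simp [Bool.or_assoc]
    · rw [bScan, if_pos (by simp [hsd]), ed, hsd]
      simp

-- ===== VERDICT (by name: the statement is the Claim_ definition above) =====
set_option maxHeartbeats 1000000 in
theorem classify_course_py_spec : Claim_equal_classify_course_py := by
  intro title _
  unfold Spec_classify_course_py classify_course_py classify_course_py_alt
  rw [← PySem.Str.toList_lower, bScan_eq, bDessert_eq, bMains_eq, mains_strs_eq]
  simp only [Bool.false_or, List.any_map, Function.comp_def]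
  have hdes : dessertSet.any (fun kw => PySem.Str.isIn kw (PySem.Str.lower title)) =
      bDessertStrs.any (fun kw => PySem.Chars.isIn kw.toList (PySem.Str.lower title).toList) := by
    rw [dessertSet, any_ofList, dessert_any_eq]
    exact PySem.List.any_congr_mem (fun kw _ => by simp [PySem.Str.isIn_eq])
  have hmain : mainsSet.any (fun kw => PySem.Str.isIn kw (PySem.Str.lower title) ||
        PySem.Set.contains (PySem.Set.ofList
          (PySem.Str.split₀ (PySem.Str.replace (PySem.Str.lower title) "-" " "))) kw) =
      mainsKeywords.any (fun kw => PySem.Chars.isIn kw.toList (PySem.Str.lower title).toList) := by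
    rw [mainsSet, any_ofList]
    apply PySem.List.any_congr_mem
    intro kw _
    rcases hc : PySem.Set.contains (PySem.Set.ofList
        (PySem.Str.split₀ (PySem.Str.replace (PySem.Str.lower title) "-" " "))) kw with _ | _
    · simp [PySem.Str.isIn_eq]
    · have h' : kw ∈ PySem.Set.ofList
          (PySem.Str.split₀ (PySem.Str.replace (PySem.Str.lower title) "-" " ")) := by
        simpa [PySem.Set.contains] using hc
      have hmem : kw ∈ PySem.Str.split₀ (PySem.Str.replace (PySem.Str.lower title) "-" " ") :=
        (PySem.Set.mem_ofList _ kw).mp h'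
      have := word_is_substring (PySem.Str.lower title) kw hmem
      rw [PySem.Str.isIn_eq, PySem.Str.toList_lower] at this
      simp [this]
  rw [hdes, hmain]
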